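-- pv_equiv track=rewrite | github.com/zslwyuan/Hi-DMM | python_hidmm/hidmm_component1.py | fill_space_as
-- ===== SOURCE A (Python) =====
-- def fill_space_as(line):
--     ret = ""
--     for c in line:
--         if (c == ' '):
--             ret = ret + " "
--         else:
--             return ret
--     return ret
-- ===== SOURCE B (Python) =====
-- def fill_space_as(line):
--     n = len(line) - len(line.lstrip(' '))
--     return ' ' * n
-- ===== Notes on version B (the rewrite author's own statement) =====
-- stated objective: simpler
-- what changed: Replaces the per-character scan that accumulates spaces one at a time with an lstrip of spaces to measure the prefix length and a single string multiplication.
import Mathlib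
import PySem

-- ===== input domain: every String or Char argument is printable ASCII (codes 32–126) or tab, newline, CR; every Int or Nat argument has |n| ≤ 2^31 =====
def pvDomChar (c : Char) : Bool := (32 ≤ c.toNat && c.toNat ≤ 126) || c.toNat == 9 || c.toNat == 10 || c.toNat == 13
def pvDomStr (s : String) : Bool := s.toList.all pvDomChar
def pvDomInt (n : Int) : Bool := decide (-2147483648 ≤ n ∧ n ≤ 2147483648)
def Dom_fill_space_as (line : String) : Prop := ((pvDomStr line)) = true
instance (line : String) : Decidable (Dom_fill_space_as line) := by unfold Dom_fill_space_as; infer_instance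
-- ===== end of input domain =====

-- B replaces A's character-by-character space accumulation with an lstrip-of-spaces length computation plus one string multiplication (simpler).

-- ===== PORT A =====
-- loop of A: for c in line: if c == ' ' then ret = ret + " " else return ret
def fillSpaceAsLoop (cs : List Char) (ret : List Char) : List Char :=
  match cs with
  | [] => ret
  | c :: rest => if c == ' ' then fillSpaceAsLoop rest (ret ++ [' ']) else ret

def fill_space_as (line : String) : String :=
  String.mk (fillSpaceAsLoop line.toList [])

-- ===== PORT B =====
def fill_space_as_alt (line : String) : String :=
  -- line.lstrip(' ') ported by hand as dropWhile (· == ' '): exact, since Python's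
  -- lstrip(' ') removes exactly the leading run of ' ' characters
  let stripped : List Char := line.toList.dropWhile (· == ' ')
  let n : Nat := line.toList.length - stripped.length
  String.mk (List.replicate n ' ')   -- ' ' * n

-- ===== PRECONDITION & SPEC =====
def Spec_fill_space_as (line : String) (out : String) : Prop := out = fill_space_as_alt line
instance (line : String) (out : String) : Decidable (Spec_fill_space_as line out) := by unfold Spec_fill_space_as; infer_instance

-- ===== CLAIM (what is proved, stated in full; the proofs are below) =====
def Claim_equal_fill_space_as : Prop := ∀ (line : String), Dom_fill_space_as line → Spec_fill_space_as line (fill_space_as line)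

-- ===== LEMMAS AND PROOFS =====
theorem fillSpaceAsLoop_eq (cs ret : List Char) :
    fillSpaceAsLoop cs ret = ret ++ cs.takeWhile (· == ' ') := by
  induction cs generalizing ret with
  | nil => simp [fillSpaceAsLoop]
  | cons c rest ih =>
    by_cases h : c = ' '
    · subst h
      simp [fillSpaceAsLoop, List.takeWhile_cons, ih]
    · simp [fillSpaceAsLoop, List.takeWhile_cons, h]

theorem takeWhile_space_eq_replicate (cs : List Char) :
    cs.takeWhile (· == ' ') =
      List.replicate (cs.length - (cs.dropWhile (· == ' ')).length) ' ' := by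
  induction cs with
  | nil => simp
  | cons c rest ih =>
    by_cases h : c = ' '
    · subst h
      have hle : (rest.dropWhile (· == ' ')).length ≤ rest.length :=
        List.length_dropWhile_le _ _
      simp only [List.takeWhile_cons, List.dropWhile_cons]
      simp only [beq_self_eq_true, if_true, List.length_cons]
      rw [ih, Nat.succ_sub hle]
      rfl
    · simp [List.takeWhile_cons, h]

-- ===== VERDICT (by name: the statement is the Claim_ definition above) =====
theorem fill_space_as_spec : Claim_equal_fill_space_as := by
  intro line _
  unfold Spec_fill_space_as fill_space_as fill_space_as_alt
  rw [fillSpaceAsLoop_eq, takeWhile_space_eq_replicate]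
  simp
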